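-- pv_equiv track=rewrite | github.com/MatteoFoucher/CodeIUT1 | python/TP/TP9 Ensembles et dictionnaires-20241119/1_4_petites_betes/petites_betes.py | dico_par_famille
-- ===== SOURCE A (Python) =====
-- def dico_par_famille(pokedex):
--     """Construit un dictionnaire dont les les clés sont le nom de familles (str)
--     et la valeur associée est l'ensemble (set) des noms des pokemons de cette
--     famille dans le pokedex
--
--     Args:
--         pokedex (list): liste de pokemon, chaque pokemon est modélisé par
--         un couple de str (nom, famille)
--
--     Returns:
--         dict: un dictionnaire dont les clés sont le nom de familles (str) et la valeur associée est
--         l'ensemble (set) des noms des pokemons de cette famille dans le pokedex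
--     """
--     #complexité O(N)
--     dict_famille = dict()
--     nom_pokemon = set()
--     for i in range(len(pokedex)):
--         if pokedex[i][1] in dict_famille.keys():
--             dict_famille[pokedex[i][1]].add(pokedex[i][0])
--         else:
--             nom_pokemon.add(pokedex[i][0])
--             dict_famille[pokedex[i][1]] = nom_pokemon
--             nom_pokemon = set()
--     return dict_famille
-- ===== SOURCE B (Python) =====
-- def dico_par_famille(pokedex):
--     familles = list(dict.fromkeys(f for _, f in pokedex))
--     return {f: {n for n, g in pokedex if g == f} for f in familles}
-- ===== Notes on version B (the rewrite author's own statement) =====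
-- stated objective: simpler
-- what changed: Replaces the membership-guarded single hash pass with mutable set-cells by a two-pass decomposition: first collect the distinct families in order of first appearance, then build each family's set by one filtering comprehension over the pokedex.
import Mathlib
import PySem

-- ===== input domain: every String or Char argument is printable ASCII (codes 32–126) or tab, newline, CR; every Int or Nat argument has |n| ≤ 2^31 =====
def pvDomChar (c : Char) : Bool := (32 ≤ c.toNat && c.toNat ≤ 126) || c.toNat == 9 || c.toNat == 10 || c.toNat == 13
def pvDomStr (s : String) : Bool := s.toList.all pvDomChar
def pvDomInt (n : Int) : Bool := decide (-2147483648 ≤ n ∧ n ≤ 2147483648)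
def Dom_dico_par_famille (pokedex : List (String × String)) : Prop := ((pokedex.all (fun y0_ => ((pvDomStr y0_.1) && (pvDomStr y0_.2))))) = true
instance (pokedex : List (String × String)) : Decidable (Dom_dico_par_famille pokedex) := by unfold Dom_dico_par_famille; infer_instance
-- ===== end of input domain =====

-- B replaces A's membership-guarded single hash pass by a simpler two-pass decomposition
-- (distinct families first, then one filtering comprehension per family); same exact result.


-- ===== PORT A =====
-- loop body of A: state = (dict_famille, nom_pokemon)
def dicoStepA (st : PySem.Dict String (PySem.Set String) × PySem.Set String)
    (p : String × String) : PySem.Dict String (PySem.Set String) × PySem.Set String :=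
  if st.1.contains p.2 then
    (st.1.modify p.2 PySem.Set.empty (fun s => PySem.Set.add s p.1), st.2)
  else
    (st.1.insert p.2 (PySem.Set.add st.2 p.1), PySem.Set.empty)

def dico_par_famille (pokedex : List (String × String)) : List (String × List String) :=
  ((PySem.List.pyRange 0 (PySem.List.len pokedex) 1).foldl
      (fun st i => dicoStepA st (PySem.List.pyGetD pokedex i ("", "")))
      (PySem.Dict.empty, PySem.Set.empty)).1.items

-- ===== PORT B =====
def dico_par_famille_alt (pokedex : List (String × String)) : List (String × List String) :=
  let familles := PySem.List.dedup (pokedex.map Prod.snd)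
  familles.map (fun f => (f, PySem.Set.ofList ((pokedex.filter (fun p => p.2 == f)).map Prod.fst)))

-- ===== PRECONDITION & SPEC =====
def Spec_dico_par_famille (pokedex : List (String × String)) (out : List (String × List String)) : Prop := out = dico_par_famille_alt pokedex
instance (pokedex : List (String × String)) (out : List (String × List String)) : Decidable (Spec_dico_par_famille pokedex out) := by unfold Spec_dico_par_famille; infer_instance

-- ===== CLAIM (what is proved, stated in full; the proofs are below) =====
def Claim_equal_dico_par_famille : Prop := ∀ (pokedex : List (String × String)), Dom_dico_par_famille pokedex → Spec_dico_par_famille pokedex (dico_par_famille pokedex)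

-- ===== LEMMAS AND PROOFS =====

-- the invariant of A's loop: nom_pokemon is empty between iterations, the keys are the
-- families in first-appearance order, and each family maps to the set of its pokemon names
theorem dicoA_inv (xs : List (String × String)) :
    (xs.foldl dicoStepA (PySem.Dict.empty, PySem.Set.empty)).2 = PySem.Set.empty ∧
    (xs.foldl dicoStepA (PySem.Dict.empty, PySem.Set.empty)).1.keys = PySem.Set.ofList (xs.map Prod.snd) ∧
    (xs.foldl dicoStepA (PySem.Dict.empty, PySem.Set.empty)).1.keys.Nodup ∧
    ∀ f, (xs.foldl dicoStepA (PySem.Dict.empty, PySem.Set.empty)).1.getD f PySem.Set.empty =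
      PySem.Set.ofList ((xs.filter (fun p => p.2 == f)).map Prod.fst) := by
  induction xs using List.reverseRecOn with
  | nil =>
    refine ⟨rfl, ?_, ?_, fun f => ?_⟩ <;>
      simp [PySem.Dict.keys_empty, PySem.Set.ofList_nil, PySem.Dict.getD_empty]
  | append_singleton xs p ih =>
    obtain ⟨h2, hkeys, hnd, hget⟩ := ih
    rw [List.foldl_append, List.foldl_cons, List.foldl_nil]
    set st := xs.foldl dicoStepA (PySem.Dict.empty, PySem.Set.empty) with hst
    by_cases hc : st.1.contains p.2 = true
    · -- the family is already a key: A adds the name to its set in place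
      have hmem : p.2 ∈ xs.map Prod.snd :=
        (PySem.Set.mem_ofList _ _).mp (hkeys ▸ (PySem.Dict.contains_iff_mem_keys _ _).mp hc)
      simp only [dicoStepA, hc, if_pos]
      refine ⟨h2, ?_, ?_, fun f => ?_⟩
      · rw [PySem.Dict.keys_modify, PySem.Dict.keys_insert_of_contains _ _ hc, hkeys,
          List.map_append, List.map_cons, List.map_nil,
          PySem.Set.ofList_append_singleton, PySem.Set.add]
        simp [PySem.Set.contains, hmem]
      · rw [PySem.Dict.keys_modify, PySem.Dict.keys_insert_of_contains _ _ hc]; exact hnd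
      · rw [PySem.Dict.getD_modify]
        by_cases hf : f = p.2
        · subst hf
          rw [if_pos rfl, hget, List.filter_append,
            show [p].filter (fun q => q.2 == p.2) = [p] by simp,
            List.map_append, List.map_cons, List.map_nil, PySem.Set.ofList_append_singleton]
        · rw [if_neg hf, hget, List.filter_append,
            show [p].filter (fun q => q.2 == f) = [] by
              simp [List.filter, beq_eq_false_iff_ne.mpr (fun h => hf (Eq.symm h))],
            List.append_nil]
    · -- new family: a fresh singleton set is inserted
      have hc' : st.1.contains p.2 = false := by simpa using hc
      have hmem : p.2 ∉ xs.map Prod.snd := fun h =>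
        hc ((PySem.Dict.contains_iff_mem_keys _ _).mpr
          (hkeys ▸ (PySem.Set.mem_ofList _ _).mpr h))
      have hfilt : xs.filter (fun q => q.2 == p.2) = [] := by
        rw [List.filter_eq_nil_iff]
        intro q hq hq2
        exact hmem (List.mem_map.mpr ⟨q, hq, by simpa using hq2⟩)
      rw [show dicoStepA st p = (st.1.insert p.2 (PySem.Set.add PySem.Set.empty p.1),
            PySem.Set.empty) from by simp [dicoStepA, hc, h2]]
      refine ⟨rfl, ?_, ?_, fun f => ?_⟩
      · rw [PySem.Dict.keys_insert_of_not_contains _ _ hc', hkeys,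
          List.map_append, List.map_cons, List.map_nil,
          PySem.Set.ofList_append_singleton, PySem.Set.add]
        simp [PySem.Set.contains, hmem]
      · rw [PySem.Dict.keys_insert_of_not_contains _ _ hc']
        refine List.Nodup.append hnd (by simp) ?_
        simp [hkeys, PySem.Set.mem_ofList, hmem]
      · rw [PySem.Dict.getD_insert]
        by_cases hf : f = p.2
        · subst hf
          rw [if_pos rfl, List.filter_append, hfilt,
            show [p].filter (fun q => q.2 == p.2) = [p] by simp]
          rfl
        · rw [if_neg hf, hget, List.filter_append,
            show [p].filter (fun q => q.2 == f) = [] by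
              simp [List.filter, beq_eq_false_iff_ne.mpr (fun h => hf (Eq.symm h))],
            List.append_nil]

theorem dico_par_famille_eq_fold (pokedex : List (String × String)) :
    dico_par_famille pokedex = (pokedex.foldl dicoStepA (PySem.Dict.empty, PySem.Set.empty)).1.items := by
  unfold dico_par_famille
  rw [PySem.List.foldl_pyRange_zero_pyGetD]

-- ===== VERDICT (by name: the statement is the Claim_ definition above) =====
theorem dico_par_famille_spec : Claim_equal_dico_par_famille := by
  intro pokedex _
  obtain ⟨h2, hkeys, hnd, hget⟩ := dicoA_inv pokedex
  show dico_par_famille pokedex = _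
  rw [dico_par_famille_eq_fold,
    PySem.Dict.items_eq_map_keys _ hnd PySem.Set.empty, hkeys]
  simp only [dico_par_famille_alt, PySem.List.dedup_eq_ofList]
  exact List.map_congr_left (fun f _ => by rw [hget f])
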